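-- pv_equiv track=rewrite | github.com/Dhruvil-8/VedicGPT | v1-custom-bpe/code/evaluate_model_bpe.py | near_duplicate_check
-- ===== SOURCE A (Python) =====
-- def near_duplicate_check(gen_lines, train_text, min_length=15):
--     exact = 0
--     near = 0
--     total = 0
--     for line in gen_lines:
--         line = line.strip()
--         if len(line) < min_length:
--             continue
--         total += 1
--         if line in train_text:
--             exact += 1
--         else:
--             found_near = False
--             step = max(1, len(line) // 4)
--             for i in range(0, len(line) - min_length + 1, step):
--                 if line[i:i+min_length] in train_text:
--                     found_near = True
--                     break
--             if found_near:
--                 near += 1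
--     return exact, near, total
-- ===== SOURCE B (Python) =====
-- def near_duplicate_check(gen_lines, train_text, min_length=15):
--     # Tally multiplicities of the stripped long-enough lines first, then classify
--     # each DISTINCT line exactly once and add its multiplicity to the counters.
--     mult = {}
--     for l in gen_lines:
--         s = l.strip()
--         if len(s) >= min_length:
--             mult[s] = mult.get(s, 0) + 1
--     exact = near = total = 0
--     for s, k in mult.items():
--         total += k
--         if s in train_text:
--             exact += k
--         elif any(s[i:i + min_length] in train_text
--                  for i in range(0, len(s) - min_length + 1, max(1, len(s) // 4))):
--             near += k
--     return exact, near, total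
-- ===== Notes on version B (the rewrite author's own statement) =====
-- stated objective: alternative
-- what changed: B builds a multiplicity dict of the stripped long-enough lines in one pass and then classifies each DISTINCT line exactly once (adding its multiplicity to the counters, with any() for the window probe), instead of A's single loop that re-classifies every occurrence with a break-flag inner loop.
import Mathlib
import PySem

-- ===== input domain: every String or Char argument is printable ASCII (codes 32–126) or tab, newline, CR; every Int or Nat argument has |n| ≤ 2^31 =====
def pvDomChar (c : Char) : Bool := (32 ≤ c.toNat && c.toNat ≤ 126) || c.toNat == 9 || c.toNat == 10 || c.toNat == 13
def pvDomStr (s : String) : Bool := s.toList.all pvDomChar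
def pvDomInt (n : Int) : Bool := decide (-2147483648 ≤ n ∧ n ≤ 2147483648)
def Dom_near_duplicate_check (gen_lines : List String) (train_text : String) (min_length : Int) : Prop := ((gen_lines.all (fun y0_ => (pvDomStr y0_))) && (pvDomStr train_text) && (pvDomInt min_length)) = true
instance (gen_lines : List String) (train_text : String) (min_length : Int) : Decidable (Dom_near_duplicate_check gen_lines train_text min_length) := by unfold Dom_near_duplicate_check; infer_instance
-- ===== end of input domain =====

-- B tallies the multiplicity of each stripped line in a dict first and classifies every
-- DISTINCT line once, adding its multiplicity (objective: alternative strategy, same cost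
-- on duplicate-free input; return value only, neither program mutates its arguments).

-- shared loop shape: Python's lazy `any(p(i) for i in range(0, stop, step))` /
-- `for i in range(...): if p(i): found = True; break` — stops at the first hit, so it
-- evaluates without materialising the range (the `max 1` only guards termination;
-- both call sites pass a step that is already ≥ 1)
def pyAnyStride (p : Int → Bool) (step stop i : Int) : Bool :=
  if i < stop then (if p i then true else pyAnyStride p step stop (i + max 1 step)) else false
termination_by (stop - i).toNat
decreasing_by
  have h1 : (1 : Int) ≤ max 1 step := le_max_left _ _
  omega

-- ===== PORT A =====
-- one iteration of A's "for line in gen_lines" loop on the state (exact, near, total)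
def ndcStep (train_text : String) (min_length : Int) (st : Int × Int × Int) (line0 : String) : Int × Int × Int :=
  let line := PySem.Str.strip line0
  if PySem.Str.len line < min_length then st
  else if PySem.Str.isIn line train_text then (st.1 + 1, st.2.1, st.2.2 + 1)
  else if pyAnyStride
      (fun i => PySem.Str.isIn (PySem.Str.slice line (some i) (some (i + min_length))) train_text)
      (max 1 (PySem.Int.floordiv (PySem.Str.len line) 4))
      (PySem.Str.len line - min_length + 1) 0
  then (st.1, st.2.1 + 1, st.2.2 + 1) else (st.1, st.2.1, st.2.2 + 1)

def near_duplicate_check (gen_lines : List String) (train_text : String) (min_length : Int) : List Int :=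
  let st := gen_lines.foldl (ndcStep train_text min_length) (0, 0, 0)
  [st.1, st.2.1, st.2.2]

-- ===== PORT B =====
def near_duplicate_check_alt (gen_lines : List String) (train_text : String) (min_length : Int) : List Int :=
  let mult : PySem.Dict String Int := gen_lines.foldl (fun d l =>
    if min_length ≤ PySem.Str.len (PySem.Str.strip l) then
      d.insert (PySem.Str.strip l) (d.getD (PySem.Str.strip l) 0 + 1)
    else d) PySem.Dict.empty
  let st := mult.items.foldl (fun (st : Int × Int × Int) (p : String × Int) =>
    if PySem.Str.isIn p.1 train_text then (st.1 + p.2, st.2.1, st.2.2 + p.2)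
    else if pyAnyStride
        (fun i => PySem.Str.isIn (PySem.Str.slice p.1 (some i) (some (i + min_length))) train_text)
        (max 1 (PySem.Int.floordiv (PySem.Str.len p.1) 4))
        (PySem.Str.len p.1 - min_length + 1) 0
    then (st.1, st.2.1 + p.2, st.2.2 + p.2)
    else (st.1, st.2.1, st.2.2 + p.2)) (0, 0, 0)
  [st.1, st.2.1, st.2.2]

-- ===== PRECONDITION & SPEC =====
def Spec_near_duplicate_check (gen_lines : List String) (train_text : String) (min_length : Int) (out : List Int) : Prop := out = near_duplicate_check_alt gen_lines train_text min_length
instance (gen_lines : List String) (train_text : String) (min_length : Int) (out : List Int) : Decidable (Spec_near_duplicate_check gen_lines train_text min_length out) := by unfold Spec_near_duplicate_check; infer_instance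

-- ===== CLAIM (what is proved, stated in full; the proofs are below) =====
def Claim_equal_near_duplicate_check : Prop := ∀ (gen_lines : List String) (train_text : String) (min_length : Int), Dom_near_duplicate_check gen_lines train_text min_length → Spec_near_duplicate_check gen_lines train_text min_length (near_duplicate_check gen_lines train_text min_length)

-- ===== LEMMAS AND PROOFS =====

-- the per-line near probe and the three per-line predicates, named for the proofs
def ndcProbe (T : String) (m : Int) (s : String) : Bool :=
  pyAnyStride
    (fun i => PySem.Str.isIn (PySem.Str.slice s (some i) (some (i + m))) T)
    (max 1 (PySem.Int.floordiv (PySem.Str.len s) 4))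
    (PySem.Str.len s - m + 1) 0

def ndcLong (m : Int) (s : String) : Bool := decide (m ≤ PySem.Str.len s)
def ndcE (T : String) (s : String) : Bool := PySem.Str.isIn s T
def ndcN (T : String) (m : Int) (s : String) : Bool := !PySem.Str.isIn s T && ndcProbe T m s

-- A's single fold over the lines computes the three counts over the stripped long lines
theorem ndc_fold_eq (T : String) (m : Int) (ls : List String) (e n t : Int) :
    ls.foldl (ndcStep T m) (e, n, t) =
      (e + ((((ls.map PySem.Str.strip).filter (ndcLong m)).countP (ndcE T) : Int)),
       n + ((((ls.map PySem.Str.strip).filter (ndcLong m)).countP (ndcN T m) : Int)),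
       t + (((ls.map PySem.Str.strip).filter (ndcLong m)).length : Int)) := by
  induction ls generalizing e n t with
  | nil => simp
  | cons x xs ih =>
    simp only [List.map_cons, List.foldl_cons]
    rw [ndcStep]
    by_cases h1 : PySem.Str.len (PySem.Str.strip x) < m
    · rw [if_pos h1, ih]
      rw [List.filter_cons_of_neg (by simp only [ndcLong, decide_eq_true_eq]; omega)]
    · rw [if_neg h1]
      rw [List.filter_cons_of_pos (by simp only [ndcLong, decide_eq_true_eq]; omega)]
      by_cases h2 : PySem.Str.isIn (PySem.Str.strip x) T = true
      · rw [if_pos h2, ih]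
        rw [List.countP_cons_of_pos (show ndcE T (PySem.Str.strip x) = true from h2),
            List.countP_cons_of_neg (show ¬ ndcN T m (PySem.Str.strip x) = true by
              simp only [ndcN, h2, Bool.not_true, Bool.false_and]; exact Bool.false_ne_true)]
        simp only [Prod.mk.injEq, List.length_cons]
        push_cast
        refine ⟨?_, ?_, ?_⟩ <;> first | exact trivial | omega
      · rw [if_neg h2]
        rw [List.countP_cons_of_neg (show ¬ ndcE T (PySem.Str.strip x) = true from h2)]
        by_cases h3 : pyAnyStride
            (fun i => PySem.Str.isIn (PySem.Str.slice (PySem.Str.strip x) (some i) (some (i + m))) T)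
            (max 1 (PySem.Int.floordiv (PySem.Str.len (PySem.Str.strip x)) 4))
            (PySem.Str.len (PySem.Str.strip x) - m + 1) 0 = true
        · rw [if_pos h3, ih,
            List.countP_cons_of_pos (show ndcN T m (PySem.Str.strip x) = true by
              simp only [ndcN, ndcProbe, h3, Bool.and_true, Bool.not_eq_true']
              exact Bool.eq_false_iff.mpr h2)]
          simp only [Prod.mk.injEq, List.length_cons]
          push_cast
          refine ⟨?_, ?_, ?_⟩ <;> first | exact trivial | omega
        · rw [if_neg h3, ih,
            List.countP_cons_of_neg (show ¬ ndcN T m (PySem.Str.strip x) = true by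
              simp only [ndcN, ndcProbe, Bool.and_eq_true, not_and]
              exact fun _ hh => h3 hh)]
          simp only [Prod.mk.injEq, List.length_cons]
          push_cast
          refine ⟨?_, ?_, ?_⟩ <;> first | exact trivial | omega

-- B's first loop builds the counter of the stripped long lines
theorem ndc_mult_eq (m : Int) (ls : List String) (d : PySem.Dict String Int) :
    ls.foldl (fun d l =>
      if m ≤ PySem.Str.len (PySem.Str.strip l) then
        d.insert (PySem.Str.strip l) (d.getD (PySem.Str.strip l) 0 + 1)
      else d) d
    = ((ls.map PySem.Str.strip).filter (ndcLong m)).foldl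
        (fun d x => d.modify x 0 (fun v => v + 1)) d := by
  induction ls generalizing d with
  | nil => rfl
  | cons x xs ih =>
    simp only [List.map_cons, List.foldl_cons]
    by_cases h : m ≤ PySem.Str.len (PySem.Str.strip x)
    · rw [if_pos h, List.filter_cons_of_pos (by simp only [ndcLong, decide_eq_true_eq]; omega),
        List.foldl_cons, ih]
      rfl
    · rw [if_neg h, List.filter_cons_of_neg (by simp only [ndcLong, decide_eq_true_eq]; omega), ih]

-- B's second loop is three weighted sums over the dict items
theorem ndc_items_fold (T : String) (m : Int) (items : List (String × Int)) (e n t : Int) :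
    items.foldl (fun (st : Int × Int × Int) (p : String × Int) =>
      if PySem.Str.isIn p.1 T then (st.1 + p.2, st.2.1, st.2.2 + p.2)
      else if pyAnyStride
          (fun i => PySem.Str.isIn (PySem.Str.slice p.1 (some i) (some (i + m))) T)
          (max 1 (PySem.Int.floordiv (PySem.Str.len p.1) 4))
          (PySem.Str.len p.1 - m + 1) 0
      then (st.1, st.2.1 + p.2, st.2.2 + p.2)
      else (st.1, st.2.1, st.2.2 + p.2)) (e, n, t) =
    (e + (items.map (fun p => if ndcE T p.1 then p.2 else 0)).sum,
     n + (items.map (fun p => if ndcN T m p.1 then p.2 else 0)).sum,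
     t + (items.map (fun p => p.2)).sum) := by
  induction items generalizing e n t with
  | nil => simp
  | cons p ps ih =>
    simp only [List.foldl_cons, List.map_cons, List.sum_cons]
    by_cases h2 : PySem.Str.isIn p.1 T = true
    · rw [if_pos h2, ih, if_pos (show ndcE T p.1 = true from h2),
        if_neg (show ¬ ndcN T m p.1 = true by
          simp only [ndcN, h2, Bool.not_true, Bool.false_and]; exact Bool.false_ne_true)]
      simp only [Prod.mk.injEq]
      refine ⟨?_, ?_, ?_⟩ <;> first | exact trivial | omega
    · rw [if_neg h2, if_neg (show ¬ ndcE T p.1 = true from h2)]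
      by_cases h3 : pyAnyStride
          (fun i => PySem.Str.isIn (PySem.Str.slice p.1 (some i) (some (i + m))) T)
          (max 1 (PySem.Int.floordiv (PySem.Str.len p.1) 4))
          (PySem.Str.len p.1 - m + 1) 0 = true
      · rw [if_pos h3, ih, if_pos (show ndcN T m p.1 = true by
            simp only [ndcN, ndcProbe, h3, Bool.and_true, Bool.not_eq_true']
            exact Bool.eq_false_iff.mpr h2)]
        simp only [Prod.mk.injEq]
        refine ⟨?_, ?_, ?_⟩ <;> first | exact trivial | omega
      · rw [if_neg h3, ih, if_neg (show ¬ ndcN T m p.1 = true by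
            simp only [ndcN, ndcProbe, Bool.and_eq_true, not_and]
            exact fun _ hh => h3 hh)]
        simp only [Prod.mk.injEq]
        refine ⟨?_, ?_, ?_⟩ <;> first | exact trivial | omega

-- summing a predicate weighted by multiplicities over the distinct elements is countP
theorem ndc_count_sum (q : String → Bool) (ls : List String) :
    ((PySem.Set.ofList ls).map (fun k => if q k then (ls.count k : Int) else 0)).sum
      = (ls.countP q : Int) := by
  induction ls using List.reverseRecOn with
  | nil => simp [PySem.Set.ofList]
  | append_singleton xs x ih =>
    have hofl : PySem.Set.ofList (xs ++ [x]) = PySem.Set.add (PySem.Set.ofList xs) x := by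
      rw [PySem.Set.ofList_eq_foldl, PySem.Set.ofList_eq_foldl, List.foldl_append]
      rfl
    have hcnt : ∀ k : String, (xs ++ [x]).count k = xs.count k + (if k = x then 1 else 0) := by
      intro k
      rw [List.count_append]
      by_cases h : k = x
      · simp [h]
      · simp only [List.count_singleton, beq_iff_eq]
        rw [if_neg (fun hh => h hh.symm), if_neg h]
    have hcp : ((xs ++ [x]).countP q : Int) = (xs.countP q : Int) + (if q x then 1 else 0) := by
      rw [List.countP_append]
      simp only [List.countP_cons, List.countP_nil]
      by_cases hq : q x = true <;> simp [hq]
    by_cases hx : x ∈ xs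
    · have hxS : x ∈ PySem.Set.ofList xs := (PySem.Set.mem_ofList xs x).mpr hx
      have hadd : PySem.Set.add (PySem.Set.ofList xs) x = PySem.Set.ofList xs := by
        simp only [PySem.Set.add]
        rw [if_pos (by simpa [PySem.Set.contains, PySem.Set.mem_ofList] using hx)]
      rw [hofl, hadd, hcp, ← ih]
      have hnd : (PySem.Set.ofList xs).Nodup := PySem.Set.nodup_ofList xs
      have hperm := List.perm_cons_erase hxS
      have hxnotin : x ∉ (PySem.Set.ofList xs).erase x := hnd.not_mem_erase
      rw [List.Perm.sum_eq (hperm.map (fun k => if q k then ((xs ++ [x]).count k : Int) else 0)),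
          List.Perm.sum_eq (hperm.map (fun k => if q k then (xs.count k : Int) else 0))]
      simp only [List.map_cons, List.sum_cons]
      have hrest : (((PySem.Set.ofList xs).erase x).map
            (fun k => if q k then ((xs ++ [x]).count k : Int) else 0)).sum
          = (((PySem.Set.ofList xs).erase x).map
            (fun k => if q k then (xs.count k : Int) else 0)).sum := by
        congr 1
        apply List.map_congr_left
        intro k hk
        have hkx : k ≠ x := fun hkx => hxnotin (hkx ▸ hk)
        rw [hcnt k, if_neg hkx]
        push_cast
        ring_nf
      rw [hrest, hcnt x, if_pos rfl]
      split_ifs with hq <;> push_cast <;> ring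
    · have hadd : PySem.Set.add (PySem.Set.ofList xs) x = PySem.Set.ofList xs ++ [x] := by
        simp only [PySem.Set.add]
        rw [if_neg (by simpa [PySem.Set.contains, PySem.Set.mem_ofList] using hx)]
      rw [hofl, hadd, hcp, ← ih, List.map_append, List.sum_append]
      have hrest : ((PySem.Set.ofList xs).map
            (fun k => if q k then ((xs ++ [x]).count k : Int) else 0)).sum
          = ((PySem.Set.ofList xs).map
            (fun k => if q k then (xs.count k : Int) else 0)).sum := by
        congr 1
        apply List.map_congr_left
        intro k hk
        have hkx : k ≠ x := fun hkx => hx (hkx ▸ (PySem.Set.mem_ofList xs k).mp hk)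
        rw [hcnt k, if_neg hkx]
        push_cast
        ring_nf
      rw [hrest]
      have hcx : xs.count x = 0 := List.count_eq_zero.mpr hx
      simp only [List.map_cons, List.map_nil, List.sum_cons, List.sum_nil, hcnt x, hcx]
      split_ifs with hq <;> push_cast <;> ring

-- and summing the multiplicities themselves is the length
theorem ndc_count_sum_total (ls : List String) :
    ((PySem.Set.ofList ls).map (fun k => (ls.count k : Int))).sum = (ls.length : Int) := by
  have h := ndc_count_sum (fun _ => true) ls
  simpa using h

-- ===== VERDICT (by name: the statement is the Claim_ definition above) =====
theorem near_duplicate_check_spec : Claim_equal_near_duplicate_check := by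
  intro gen_lines T m _
  unfold Spec_near_duplicate_check near_duplicate_check near_duplicate_check_alt
  simp only []
  rw [ndc_fold_eq, ndc_mult_eq]
  rw [show ((gen_lines.map PySem.Str.strip).filter (ndcLong m)).foldl
        (fun d x => d.modify x 0 (fun v => v + 1)) PySem.Dict.empty
      = PySem.Dict.counter ((gen_lines.map PySem.Str.strip).filter (ndcLong m)) from rfl]
  rw [PySem.Dict.items_counter, ndc_items_fold]
  simp only [List.map_map, Function.comp_def]
  rw [ndc_count_sum (ndcE T), ndc_count_sum (ndcN T m), ndc_count_sum_total]
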